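-- pv_equiv track=rewrite | github.com/JesesePU/Tian-AI | Tian AI/tian_ai/evolution.py | _extract_topic
-- ===== SOURCE A (Python) =====
-- from typing import Optional, Dict, List, Set, Tuple
--
-- def _extract_topic(query: str) -> Optional[str]:
--     stop_words = {'the', 'a', 'an', 'is', 'are', 'was', 'were', 'to',
--                   'of', 'in', 'for', 'on', 'with', 'at', 'by', 'from',
--                   'what', 'why', 'how', 'when', 'where', 'who', 'does',
--                   'do', 'did', 'can', 'will', 'would', 'could', 'should',
--                   'this', 'that', 'these', 'those'}
--     words = query.strip().lower().split()
--     content = [w for w in words if w not in stop_words and len(w) > 2]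
--     if not content:
--         return None
--     for i in range(len(content)):
--         pair = ' '.join(content[i:i+2])
--         if len(pair) > 4:
--             return pair
--     return content[0]
-- ===== SOURCE B (Python) =====
-- from typing import Optional
--
--
-- def _extract_topic(query: str) -> Optional[str]:
--     # Single pass with an accumulator and early exit: remember the first
--     # content word; as soon as a second one appears, return the two joined
--     # (every content word has len > 2, so the joined pair always passes A's
--     # len > 4 test at i = 0).  No filtered list, no pair-scanning loop.
--     stop_words = {'the', 'a', 'an', 'is', 'are', 'was', 'were', 'to',
--                   'of', 'in', 'for', 'on', 'with', 'at', 'by', 'from',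
--                   'what', 'why', 'how', 'when', 'where', 'who', 'does',
--                   'do', 'did', 'can', 'will', 'would', 'could', 'should',
--                   'this', 'that', 'these', 'those'}
--     first = None
--     for w in query.strip().lower().split():
--         if w in stop_words or len(w) <= 2:
--             continue
--         if first is None:
--             first = w
--         else:
--             return first + ' ' + w
--     return first
-- ===== Notes on version B (the rewrite author's own statement) =====
-- stated objective: alternative
-- what changed: Replaces A's build-a-filtered-list-then-scan-index-pairs structure with a single early-exit pass holding one accumulator (the first content word), returning the concatenated pair as soon as a second content word appears; correct because every content word has length > 2, so A's len(pair) > 4 test always fires at i = 0.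
import Mathlib
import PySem

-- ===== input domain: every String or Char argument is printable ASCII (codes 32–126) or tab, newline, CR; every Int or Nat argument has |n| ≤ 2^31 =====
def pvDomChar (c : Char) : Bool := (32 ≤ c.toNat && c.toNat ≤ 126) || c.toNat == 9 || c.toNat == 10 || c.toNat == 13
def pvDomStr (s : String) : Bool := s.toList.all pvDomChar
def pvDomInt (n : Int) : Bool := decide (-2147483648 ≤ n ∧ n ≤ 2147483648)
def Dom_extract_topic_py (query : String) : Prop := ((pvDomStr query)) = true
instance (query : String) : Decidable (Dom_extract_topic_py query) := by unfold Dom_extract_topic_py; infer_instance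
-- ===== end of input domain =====

-- B replaces A's filter-then-pair-scan by a single early-exit pass with one accumulator (alternative; same cost).

-- ===== PORT A =====
def pvStopWords : PySem.Set String :=
  PySem.Set.ofList ["the", "a", "an", "is", "are", "was", "were", "to",
                    "of", "in", "for", "on", "with", "at", "by", "from",
                    "what", "why", "how", "when", "where", "who", "does",
                    "do", "did", "can", "will", "would", "could", "should",
                    "this", "that", "these", "those"]

def pvContentPred (w : String) : Bool :=
  !(PySem.Set.contains pvStopWords w) && decide (2 < PySem.Str.len w)

-- the 'for i in range(len(content))' loop of A, step for step
def extract_topic_loop (content : List String) (i : Nat) : Option String :=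
  if h : i < content.length then
    let pair := PySem.Str.join " " (PySem.List.slice content (some (i : Int)) (some ((i + 2 : Nat) : Int)))
    if 4 < PySem.Str.len pair then some pair
    else extract_topic_loop content (i + 1)
  else none
termination_by content.length - i
decreasing_by omega

def extract_topic_py (query : String) : Option String :=
  let words := PySem.Str.split₀ (PySem.Str.lower (PySem.Str.strip query))
  let content := words.filter pvContentPred
  match content with
  | [] => none
  | c0 :: _ =>
    match extract_topic_loop content 0 with
    | some pair => some pair
    | none => some c0

-- ===== PORT B =====
-- B's for-loop: 'first' is the accumulator; a second content word returns immediately.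
def extract_topic_b_loop (ws : List String) (first : Option String) : Option String :=
  match ws with
  | [] => first
  | w :: rest =>
    if PySem.Set.contains pvStopWords w || decide (PySem.Str.len w ≤ 2) then
      extract_topic_b_loop rest first
    else
      match first with
      | none => extract_topic_b_loop rest (some w)
      | some f => some (f ++ " " ++ w)

def extract_topic_py_alt (query : String) : Option String :=
  extract_topic_b_loop (PySem.Str.split₀ (PySem.Str.lower (PySem.Str.strip query))) none

-- ===== PRECONDITION & SPEC =====
def Spec_extract_topic_py (query : String) (out : Option String) : Prop := out = extract_topic_py_alt query
instance (query : String) (out : Option String) : Decidable (Spec_extract_topic_py query out) := by unfold Spec_extract_topic_py; infer_instance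

-- ===== CLAIM (what is proved, stated in full; the proofs are below) =====
def Claim_equal_extract_topic_py : Prop := ∀ (query : String), Dom_extract_topic_py query → Spec_extract_topic_py query (extract_topic_py query)

-- ===== LEMMAS AND PROOFS =====

lemma pvJoin_one (sep p : String) : PySem.Str.join sep [p] = p :=
  String.toList_inj.mp (by simp [PySem.Chars.join_singleton])

lemma pvJoin_two_toList (w y : String) :
    (PySem.Str.join " " [w, y]).toList = w.toList ++ ' ' :: y.toList := by
  simp [PySem.Str.toList_join, PySem.Chars.join_cons_cons, PySem.Chars.join_singleton]

lemma pvJoin_two (w y : String) :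
    PySem.Str.join " " [w, y] = w ++ " " ++ y := by
  apply String.toList_inj.mp
  simp [PySem.Str.toList_join, PySem.Chars.join_cons_cons, PySem.Chars.join_singleton]

lemma pvSliceStep (xs : List String) (i : Nat) :
    PySem.List.slice xs (some (i : Int)) (some ((i + 2 : Nat) : Int)) = (xs.drop i).take 2 := by
  simpa using PySem.List.slice_natCast xs i (i + 2)

-- closed form both tails reduce to, on lists of content (len > 2) words
def pvTailC (content : List String) : Option String :=
  match content with
  | [] => none
  | [w] => some w
  | w :: y :: _ => some (w ++ " " ++ y)

-- the body of port A after the shared content list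
def pvTailA (content : List String) : Option String :=
  match content with
  | [] => none
  | c0 :: _ =>
    match extract_topic_loop content 0 with
    | some pair => some pair
    | none => some c0

lemma pvA_closed (content : List String) (hlen : ∀ w ∈ content, 2 < PySem.Str.len w) :
    pvTailA content = pvTailC content := by
  unfold pvTailA pvTailC
  match content with
  | [] => rfl
  | [w] =>
    have hw : 2 < PySem.Str.len w := hlen w (by simp)
    unfold extract_topic_loop
    rw [dif_pos (by simp)]
    simp only [pvSliceStep, List.drop_zero, List.take, pvJoin_one]
    by_cases h4 : 4 < PySem.Str.len w
    · rw [if_pos h4]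
    · rw [if_neg h4]
      unfold extract_topic_loop
      rw [dif_neg (by simp)]
  | w :: y :: rest =>
    have hw : 2 < PySem.Str.len w := hlen w (by simp)
    have hy : 2 < PySem.Str.len y := hlen y (by simp)
    have hpair : 4 < PySem.Str.len (PySem.Str.join " " [w, y]) := by
      rw [PySem.Str.len_eq, pvJoin_two_toList]
      rw [PySem.Str.len_eq] at hw hy
      simp only [List.length_append, List.length_cons]
      push_cast at *
      omega
    unfold extract_topic_loop
    rw [dif_pos (by simp)]
    simp only [pvSliceStep, List.drop_zero]
    rw [if_pos (by simpa using hpair)]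
    simp [List.take, pvJoin_two]

-- the skip condition of B's loop is the negation of pvContentPred
lemma pvSkip_eq (w : String) :
    (PySem.Set.contains pvStopWords w || decide (PySem.Str.len w ≤ 2)) = !pvContentPred w := by
  unfold pvContentPred
  cases hc : PySem.Set.contains pvStopWords w
  · simp only [Bool.not_false, Bool.true_and, Bool.false_or]
    rcases lt_or_ge 2 (PySem.Str.len w) with h | h
    · rw [decide_eq_true h, Bool.not_true]
      exact decide_eq_false (by omega)
    · rw [decide_eq_false (by omega : ¬ 2 < PySem.Str.len w), Bool.not_false]
      exact decide_eq_true (by omega)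
  · simp

-- B's loop with a filled accumulator returns f, or f joined to the next content word
lemma pvB_some (ws : List String) (f : String) :
    extract_topic_b_loop ws (some f) =
      some (match ws.filter pvContentPred with
            | [] => f
            | y :: _ => f ++ " " ++ y) := by
  induction ws with
  | nil => rfl
  | cons w rest ih =>
    simp only [extract_topic_b_loop, pvSkip_eq]
    by_cases hp : pvContentPred w = true
    · rw [hp, List.filter_cons_of_pos hp]
      simp only [Bool.not_true, Bool.false_eq_true, if_false]
    · rw [Bool.eq_false_iff.mpr hp, List.filter_cons_of_neg (by simpa using hp)]
      simp only [Bool.not_false, if_true]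
      exact ih

lemma pvB_closed (ws : List String) :
    extract_topic_b_loop ws none = pvTailC (ws.filter pvContentPred) := by
  induction ws with
  | nil => rfl
  | cons w rest ih =>
    simp only [extract_topic_b_loop, pvSkip_eq]
    by_cases hp : pvContentPred w = true
    · rw [hp, List.filter_cons_of_pos hp]
      simp only [Bool.not_true, Bool.false_eq_true, if_false]
      rw [pvB_some]
      cases h : rest.filter pvContentPred <;> simp [pvTailC]
    · rw [Bool.eq_false_iff.mpr hp, List.filter_cons_of_neg (by simpa using hp)]
      simp only [Bool.not_false, if_true]
      exact ih

-- ===== VERDICT (by name: the statement is the Claim_ definition above) =====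
theorem extract_topic_py_spec : Claim_equal_extract_topic_py := by
  intro query _
  show extract_topic_py query = extract_topic_py_alt query
  simp only [extract_topic_py, extract_topic_py_alt]
  rw [pvB_closed]
  have h : ∀ w ∈ (PySem.Str.split₀ (PySem.Str.lower (PySem.Str.strip query))).filter pvContentPred,
      2 < PySem.Str.len w := by
    intro w hw
    have hp := List.of_mem_filter hw
    simp only [pvContentPred, Bool.and_eq_true, decide_eq_true_eq] at hp
    exact hp.2
  revert h
  generalize (PySem.Str.split₀ (PySem.Str.lower (PySem.Str.strip query))).filter pvContentPred = c
  intro h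
  show pvTailA c = pvTailC c
  exact pvA_closed c h
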